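-- pv_equiv track=rewrite | github.com/2Geigh/CSC108 | assignments/Assignment_2/compatibility_calculator.py | get_numerological_root
-- ===== SOURCE A (Python) =====
-- def get_numerological_root(num: int) -> int:
--     """
--     Return the root number of num, found by repeatedly adding the digits in
--     the number together until you are left with a single digit or the Special
--     Numbers 11 or 22.
--
--     >>> get_numerological_root(1989)
--     9
--
--     >>> get_numerological_root(11)
--     11
--
--     >>> get_numerological_root(1993)
--     22
--
--     >>> get_numerological_root(2002)
--     4
--
--     """
--
--     if num in [11, 22]:
--         return num
--
--     return_value = 0
--
--     # first iteration of summing digits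
--     for i in str(num):
--         return_value += int(i)
--     # checking if they're greater than 9 or one of the magic numbers
--     # upon first iteration
--     if (return_value in [11, 22] or len(str(return_value)) == 1):
--
--         return return_value
--     else:
--         # do this forever until the number is one of the magic numbers
--         # or becomes only one digit long
--         while True:
--             new_num = return_value
--             return_value = 0
--
--             for i in str(new_num):
--                 return_value += int(i)
--
--             if return_value in [11, 22] or len(str(return_value)) == 1:
--                 return return_value
-- ===== SOURCE B (Python) =====
-- def _digit_sum(n: int) -> int:
--     s = 0
--     while n:
--         s += n % 10
--         n //= 10
--     return s
--
--
-- def get_numerological_root(num: int) -> int: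
--     if num in (11, 22) or 0 <= num <= 9:
--         return num
--     return get_numerological_root(_digit_sum(num))
-- ===== Notes on version B (the rewrite author's own statement) =====
-- stated objective: alternative
-- what changed: A's string-conversion digit summing (str(num) with int() per character) inside a guard + unrolled first pass + while-True loop is replaced by a recursive function over an arithmetic divmod-based digit sum (n % 10, n //= 10), so no string is ever built and the repeat-until-fixed structure is recursion instead of staged loops.
import Mathlib
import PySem

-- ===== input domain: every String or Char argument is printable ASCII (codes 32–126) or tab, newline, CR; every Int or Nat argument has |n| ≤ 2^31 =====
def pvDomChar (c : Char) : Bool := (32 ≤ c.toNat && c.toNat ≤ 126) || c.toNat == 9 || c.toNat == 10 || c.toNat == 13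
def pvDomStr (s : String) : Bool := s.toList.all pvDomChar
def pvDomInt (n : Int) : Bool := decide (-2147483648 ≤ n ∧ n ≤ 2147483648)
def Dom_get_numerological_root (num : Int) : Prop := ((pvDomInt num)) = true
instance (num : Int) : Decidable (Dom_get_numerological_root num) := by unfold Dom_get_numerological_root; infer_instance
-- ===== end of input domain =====

-- B replaces A's string-based digit summing and staged loops with a recursive root over an
-- arithmetic (divmod) digit sum (objective: alternative).

-- ===== PORT A =====
-- int(i) for a one-character string i; exact on the digit characters produced by str(n) for
-- n ≥ 0 (Pre_ excludes negative num, where Python raises ValueError on int('-')).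
def pvCharVal (c : Char) : Int := (PySem.Int.ofChars? [c]).getD 0

-- `rv = 0; for i in str(n): rv += int(i)`
def pvStrDigitSum (n : Int) : Int := (PySem.Int.toChars n).foldl (fun a c => a + pvCharVal c) 0

-- A's `while True` loop; fuel only makes the recursion structural (unreachable default under Pre_).
def pvLoopA : Nat → Int → Int
  | 0, r => r
  | f + 1, r =>
    let rv := pvStrDigitSum r
    if rv = 11 ∨ rv = 22 ∨ (PySem.Int.toChars rv).length = 1 then rv else pvLoopA f rv

def get_numerological_root (num : Int) : Int :=
  if num = 11 ∨ num = 22 then num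
  else
    let rv := pvStrDigitSum num
    if rv = 11 ∨ rv = 22 ∨ (PySem.Int.toChars rv).length = 1 then rv
    else pvLoopA num.toNat rv

-- ===== PORT B =====
-- B's `_digit_sum` while-loop: s = 0; while n: s += n % 10; n //= 10.
-- Fuel makes the recursion structural (sufficient for n ≥ 0; Pre_ excludes negatives).
def pvDigitSumLoop : Nat → Int → Int → Int
  | 0, _, s => s
  | f + 1, n, s =>
    if n = 0 then s
    else pvDigitSumLoop f (PySem.Int.floordiv n 10) (s + PySem.Int.mod n 10)

def pvDigitSum (n : Int) : Int := pvDigitSumLoop (n.natAbs + 1) n 0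

-- B's recursive `get_numerological_root`; fuel only makes the recursion structural.
def pvRootRec : Nat → Int → Int
  | 0, n => n
  | f + 1, n =>
    if n = 11 ∨ n = 22 ∨ (0 ≤ n ∧ n ≤ 9) then n else pvRootRec f (pvDigitSum n)

def get_numerological_root_alt (num : Int) : Int := pvRootRec (num.toNat + 1) num

-- ===== PRECONDITION & SPEC =====
-- Pre_ excludes exactly negative num, where the Python A raises ValueError (int('-') on the sign
-- character of str(num)).
def Pre_get_numerological_root (num : Int) : Prop := 0 ≤ num
instance (num : Int) : Decidable (Pre_get_numerological_root num) := by unfold Pre_get_numerological_root; infer_instance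
def pvWitness_get_numerological_root : Int := (1989)

def Spec_get_numerological_root (num : Int) (out : Int) : Prop := out = get_numerological_root_alt num
instance (num : Int) (out : Int) : Decidable (Spec_get_numerological_root num out) := by unfold Spec_get_numerological_root; infer_instance

-- ===== CLAIM (what is proved, stated in full; the proofs are below) =====
def Claim_equal_get_numerological_root : Prop := ∀ (num : Int), Dom_get_numerological_root num → Pre_get_numerological_root num → Spec_get_numerological_root num (get_numerological_root num)

-- ===== LEMMAS AND PROOFS =====

-- decimal digit sum, the mathematical object both programs iterate
def pvDS (n : Nat) : Nat := (Nat.digits 10 n).sum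

theorem pvDS_le (n : Nat) : pvDS n ≤ n := by
  induction n using Nat.strong_induction_on with
  | _ n ih =>
    rcases Nat.eq_zero_or_pos n with h | h
    · simp [pvDS, h]
    · rw [pvDS, Nat.digits_def' (by norm_num) h]
      have h1 : n / 10 < n := Nat.div_lt_self h (by norm_num)
      have := ih (n / 10) h1
      have := Nat.mod_add_div n 10
      simp only [List.sum_cons]
      unfold pvDS at *
      omega

theorem pvDS_lt (n : Nat) (h : 10 ≤ n) : pvDS n < n := by
  rw [pvDS, Nat.digits_def' (by norm_num) (by omega)]
  have h1 := pvDS_le (n / 10)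
  have h2 : 1 ≤ n / 10 := Nat.le_div_iff_mul_le (by norm_num) |>.mpr (by omega)
  have := Nat.mod_add_div n 10
  simp only [List.sum_cons]
  unfold pvDS at *
  omega

theorem pvDigits_small (n : Nat) (h0 : 0 < n) (h9 : n ≤ 9) : Nat.digits 10 n = [n] := by
  rw [Nat.digits_def' (by norm_num) h0, Nat.div_eq_of_lt (by omega), Nat.mod_eq_of_lt (by omega)]
  simp

theorem pvDS_small (n : Nat) (h9 : n ≤ 9) : pvDS n = n := by
  rcases Nat.eq_zero_or_pos n with h | h
  · simp [pvDS, h]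
  · rw [pvDS, pvDigits_small n h h9]; simp

theorem pvDS_step (n : Nat) (h : 0 < n) : pvDS n = n % 10 + pvDS (n / 10) := by
  rw [pvDS, Nat.digits_def' (by norm_num) h]
  simp [pvDS]

-- the pure root function: iterate digit sum until 11, 22, or a single digit
def pvRoot (n : Nat) : Nat :=
  if n = 11 ∨ n = 22 ∨ n ≤ 9 then n else pvRoot (pvDS n)
termination_by n
decreasing_by exact pvDS_lt n (by omega)

theorem pvCharVal_digitChar (d : Nat) (h : d < 10) : pvCharVal (Nat.digitChar d) = (d : Int) := by
  interval_cases d <;> decide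

theorem pvToDigitsCore_eq (f : Nat) : ∀ (n : Nat) (acc : List Char), 0 < n → n ≤ f →
    Nat.toDigitsCore 10 f n acc = ((Nat.digits 10 n).map Nat.digitChar).reverse ++ acc := by
  induction f with
  | zero => intro n acc h1 h2; omega
  | succ f ih =>
    intro n acc h1 h2
    rw [Nat.toDigitsCore]
    by_cases hd : n / 10 = 0
    · have h9 : n ≤ 9 := by omega
      simp [hd, pvDigits_small n h1 h9, Nat.mod_eq_of_lt (by omega : n < 10)]
    · have h10 : 10 ≤ n := by
        by_contra h; exact hd (Nat.div_eq_of_lt (by omega))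
      have h1' : 0 < n / 10 := Nat.pos_of_ne_zero hd
      have h2' : n / 10 ≤ f := by
        have : n / 10 < n := Nat.div_lt_self h1 (by norm_num)
        omega
      simp only [hd, if_false]
      rw [ih (n / 10) _ h1' h2', Nat.digits_def' (by norm_num) h1]
      simp

theorem pvToChars_natCast (n : Nat) (h : 0 < n) :
    PySem.Int.toChars (n : Int) = ((Nat.digits 10 n).map Nat.digitChar).reverse := by
  have hneg : ¬ ((n : Int) < 0) := by omega
  simp only [PySem.Int.toChars, hneg, if_false, Int.toNat_natCast]
  rw [Nat.toDigits, pvToDigitsCore_eq (n + 1) n [] h (by omega)]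
  simp

theorem pvStrDigitSum_natCast (n : Nat) : pvStrDigitSum (n : Int) = (pvDS n : Int) := by
  rcases Nat.eq_zero_or_pos n with h | h
  · subst h; decide
  · rw [pvStrDigitSum, pvToChars_natCast n h]
    have hfold : ∀ (l : List Char) (a : Int),
        l.foldl (fun a c => a + pvCharVal c) a = a + (l.map pvCharVal).sum := by
      intro l
      induction l with
      | nil => simp
      | cons x xs ihx => intro a; simp [List.foldl_cons, ihx]; ring
    rw [hfold]
    have hmap : ((Nat.digits 10 n).map Nat.digitChar).reverse.map pvCharVal
        = (Nat.digits 10 n).reverse.map (Nat.cast : Nat → Int) := by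
      rw [← List.map_reverse, List.map_map]
      apply List.map_congr_left
      intro d hd
      rw [List.mem_reverse] at hd
      exact pvCharVal_digitChar d (Nat.digits_lt_base (by norm_num) hd)
    rw [hmap, List.map_reverse, List.sum_reverse, pvDS, Nat.cast_list_sum]
    ring

theorem pvLen_one_iff (n : Nat) : (PySem.Int.toChars (n : Int)).length = 1 ↔ n ≤ 9 := by
  rcases Nat.eq_zero_or_pos n with h | h
  · subst h; constructor <;> intro <;> first | omega | decide
  · rw [pvToChars_natCast n h]
    simp only [List.length_reverse, List.length_map]
    by_cases h9 : n ≤ 9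
    · simp [pvDigits_small n h h9, h9]
    · have h10 : 10 ≤ n := by omega
      rw [Nat.digits_def' (by norm_num) h]
      have hne : Nat.digits 10 (n / 10) ≠ [] := by
        rw [Nat.digits_ne_nil_iff_ne_zero]
        have : 1 ≤ n / 10 := Nat.le_div_iff_mul_le (by norm_num) |>.mpr (by omega)
        omega
      constructor
      · intro hl
        simp only [List.length_cons] at hl
        exact absurd (List.length_eq_zero_iff.mp (by omega)) hne
      · intro; omega

-- A's stop condition, read on a Nat
theorem pvStopA_iff (m : Nat) :
    ((m : Int) = 11 ∨ (m : Int) = 22 ∨ (PySem.Int.toChars (m : Int)).length = 1)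
      ↔ (m = 11 ∨ m = 22 ∨ m ≤ 9) := by
  rw [pvLen_one_iff]
  omega

-- B's stop condition, read on a Nat
theorem pvStopB_iff (m : Nat) :
    ((m : Int) = 11 ∨ (m : Int) = 22 ∨ (0 ≤ (m : Int) ∧ (m : Int) ≤ 9))
      ↔ (m = 11 ∨ m = 22 ∨ m ≤ 9) := by
  omega

theorem pvLoopA_eq (f : Nat) : ∀ (n : Nat), ¬ (n = 11 ∨ n = 22 ∨ n ≤ 9) → n ≤ f → pvLoopA f (n : Int) = (pvRoot n : Int) := by
  induction f with
  | zero => intro n h1 h2; omega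
  | succ f ih =>
    intro n h1 h2
    have h10 : 10 ≤ n := by omega
    show (let rv := pvStrDigitSum (n : Int);
      if rv = 11 ∨ rv = 22 ∨ (PySem.Int.toChars rv).length = 1 then rv else pvLoopA f rv) = _
    simp only [pvStrDigitSum_natCast]
    conv_rhs => rw [pvRoot, if_neg h1]
    by_cases hs : pvDS n = 11 ∨ pvDS n = 22 ∨ pvDS n ≤ 9
    · rw [if_pos ((pvStopA_iff (pvDS n)).mpr hs)]
      conv_rhs => rw [pvRoot, if_pos hs]
    · rw [if_neg (by rw [pvStopA_iff]; exact hs)]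
      have hlt := pvDS_lt n h10
      exact ih (pvDS n) hs (by omega)

-- B's _digit_sum loop computes the digit sum (loop invariant over the accumulator)
theorem pvDigitSumLoop_eq (f : Nat) : ∀ (n : Nat) (s : Int), n ≤ f →
    pvDigitSumLoop f (n : Int) s = s + (pvDS n : Int) := by
  induction f with
  | zero => intro n s h; interval_cases n; simp [pvDigitSumLoop, pvDS]
  | succ f ih =>
    intro n s h
    rcases Nat.eq_zero_or_pos n with h0 | h0
    · subst h0; simp [pvDigitSumLoop, pvDS]
    · have hne : (n : Int) ≠ 0 := by omega
      rw [pvDigitSumLoop, if_neg hne]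
      have hdiv : PySem.Int.floordiv (n : Int) 10 = ((n / 10 : Nat) : Int) := by
        exact_mod_cast PySem.Int.floordiv_natCast n 10
      have hmod : PySem.Int.mod (n : Int) 10 = ((n % 10 : Nat) : Int) := by
        exact_mod_cast PySem.Int.mod_natCast n 10
      rw [hdiv, hmod, ih (n / 10) _ (by have := Nat.div_lt_self h0 (by norm_num : 1 < 10); omega)]
      rw [pvDS_step n h0]
      push_cast
      ring

theorem pvDigitSum_natCast (n : Nat) : pvDigitSum (n : Int) = (pvDS n : Int) := by
  rw [pvDigitSum, pvDigitSumLoop_eq ((n : Int).natAbs + 1) n 0 (by simp), zero_add]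

theorem pvRootRec_eq (f : Nat) : ∀ (n : Nat), n < f → pvRootRec f (n : Int) = (pvRoot n : Int) := by
  induction f with
  | zero => intro n h; omega
  | succ f ih =>
    intro n h
    rw [pvRootRec]
    by_cases hs : n = 11 ∨ n = 22 ∨ n ≤ 9
    · rw [if_pos ((pvStopB_iff n).mpr hs)]
      conv_rhs => rw [pvRoot, if_pos hs]
    · have h10 : 10 ≤ n := by omega
      rw [if_neg (by rw [pvStopB_iff]; exact hs)]
      rw [pvDigitSum_natCast, ih (pvDS n) (by have := pvDS_lt n h10; omega)]
      conv_rhs => rw [pvRoot, if_neg hs]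

-- ===== VERDICT (by name: the statement is the Claim_ definition above) =====
theorem get_numerological_root_spec : Claim_equal_get_numerological_root := by
  intro num _ hpre
  unfold Spec_get_numerological_root
  unfold Pre_get_numerological_root at hpre
  obtain ⟨m, rfl⟩ : ∃ m : Nat, num = (m : Int) := ⟨num.toNat, by omega⟩
  rw [get_numerological_root_alt, Int.toNat_natCast, pvRootRec_eq (m + 1) m (by omega)]
  rw [get_numerological_root]
  by_cases h1122 : (m : Int) = 11 ∨ (m : Int) = 22
  · rw [if_pos h1122, pvRoot, if_pos (by omega)]
  · rw [if_neg h1122]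
    show (let rv := pvStrDigitSum (m : Int);
      if rv = 11 ∨ rv = 22 ∨ (PySem.Int.toChars rv).length = 1 then rv
      else pvLoopA (Int.toNat (m : Int)) rv) = _
    simp only [pvStrDigitSum_natCast, Int.toNat_natCast]
    by_cases hs : pvDS m = 11 ∨ pvDS m = 22 ∨ pvDS m ≤ 9
    · rw [if_pos ((pvStopA_iff (pvDS m)).mpr hs)]
      by_cases h9 : m ≤ 9
      · rw [pvDS_small m h9, pvRoot, if_pos (by omega)]
      · rw [pvRoot, if_neg (by omega), pvRoot, if_pos hs]
    · rw [if_neg (by rw [pvStopA_iff]; exact hs)]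
      have h10 : 10 ≤ m := by
        by_contra h9
        have := pvDS_small m (by omega)
        exact hs (by omega)
      rw [pvLoopA_eq m (pvDS m) hs (by have := pvDS_lt m h10; omega)]
      conv_rhs => rw [pvRoot, if_neg (show ¬ (m = 11 ∨ m = 22 ∨ m ≤ 9) by omega)]
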